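-- pv_equiv track=rewrite | github.com/MRC005/Cross-Lingual-Semantic-Role-Labeling-via-Zero-Shot-Transfer | src/inference/demo_few_shot.py | rewrite_continuous
-- ===== SOURCE A (Python) =====
-- CONTINUOUS_MAP = {
--     'playing': 'played', 'running': 'ran', 'eating': 'ate',
--     'going': 'went', 'coming': 'came', 'reading': 'read',
--     'writing': 'wrote', 'singing': 'sang', 'dancing': 'danced',
--     'working': 'worked', 'studying': 'studied', 'teaching': 'taught',
--     'helping': 'helped', 'giving': 'gave', 'taking': 'took',
--     'making': 'made', 'doing': 'did', 'saying': 'said',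
--     'seeing': 'saw', 'looking': 'looked', 'walking': 'walked',
--     'talking': 'talked', 'sitting': 'sat', 'standing': 'stood',
--     'buying': 'bought', 'selling': 'sold', 'building': 'built',
--     'kicking': 'kicked', 'throwing': 'threw', 'catching': 'caught',
-- }
--
-- def rewrite_continuous(sentence):
--     words = sentence.split()
--     result = []
--     i = 0
--     while i < len(words):
--         if words[i].lower() in ('is', 'are', 'was', 'were') and i + 1 < len(words):
--             next_word = words[i + 1].lower()
--             if next_word in CONTINUOUS_MAP:
--                 result.append(CONTINUOUS_MAP[next_word])
--                 i += 2
--                 continue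
--             elif next_word.endswith('ing') and len(next_word) > 4:
--                 base = next_word[:-3]
--                 result.append(base + 'ed')
--                 i += 2
--                 continue
--         result.append(words[i])
--         i += 1
--     return ' '.join(result)
-- ===== SOURCE B (Python) =====
-- CONTINUOUS_MAP = {
--     'playing': 'played', 'running': 'ran', 'eating': 'ate',
--     'going': 'went', 'coming': 'came', 'reading': 'read',
--     'writing': 'wrote', 'singing': 'sang', 'dancing': 'danced',
--     'working': 'worked', 'studying': 'studied', 'teaching': 'taught',
--     'helping': 'helped', 'giving': 'gave', 'taking': 'took',
--     'making': 'made', 'doing': 'did', 'saying': 'said',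
--     'seeing': 'saw', 'looking': 'looked', 'walking': 'walked',
--     'talking': 'talked', 'sitting': 'sat', 'standing': 'stood',
--     'buying': 'bought', 'selling': 'sold', 'building': 'built',
--     'kicking': 'kicked', 'throwing': 'threw', 'catching': 'caught',
-- }
--
--
-- def rewrite_continuous(sentence):
--     # single forward pass carrying a pending auxiliary instead of an i+=2 lookahead
--     out = []
--     pending = None
--     for word in sentence.split():
--         if pending is not None:
--             low = word.lower()
--             if low in CONTINUOUS_MAP:
--                 out.append(CONTINUOUS_MAP[low])
--                 pending = None
--                 continue
--             if low.endswith('ing') and len(low) > 4: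
--                 out.append(low[:-3] + 'ed')
--                 pending = None
--                 continue
--             out.append(pending)
--             pending = None
--         if word.lower() in ('is', 'are', 'was', 'were'):
--             pending = word
--         else:
--             out.append(word)
--     if pending is not None:
--         out.append(pending)
--     return ' '.join(out)
-- ===== Notes on version B (the rewrite author's own statement) =====
-- stated objective: alternative
-- what changed: Replaced A's indexed while-loop with two-token lookahead and i+=2 skips by a single forward for-loop that carries a pending-auxiliary state variable, flushing it on a miss or at the end.
import Mathlib
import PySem

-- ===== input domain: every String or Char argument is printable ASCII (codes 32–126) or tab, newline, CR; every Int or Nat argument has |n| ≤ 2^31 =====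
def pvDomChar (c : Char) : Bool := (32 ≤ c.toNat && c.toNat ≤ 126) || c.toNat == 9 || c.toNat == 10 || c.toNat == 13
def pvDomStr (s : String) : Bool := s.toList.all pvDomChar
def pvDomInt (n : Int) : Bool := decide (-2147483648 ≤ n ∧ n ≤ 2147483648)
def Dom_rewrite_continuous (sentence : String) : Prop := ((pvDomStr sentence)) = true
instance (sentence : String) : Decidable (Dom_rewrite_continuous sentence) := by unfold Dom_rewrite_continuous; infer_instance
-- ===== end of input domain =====

-- B changes the decomposition: a single forward pass carrying a pending auxiliary
-- instead of A's two-token lookahead with i += 2 (objective: alternative; same cost).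

-- ===== PORT A =====
-- module constant CONTINUOUS_MAP (shared by both ports, as in the Python module)
def pvCmap : PySem.Dict String String := PySem.Dict.ofList [
  ("playing", "played"), ("running", "ran"), ("eating", "ate"),
  ("going", "went"), ("coming", "came"), ("reading", "read"),
  ("writing", "wrote"), ("singing", "sang"), ("dancing", "danced"),
  ("working", "worked"), ("studying", "studied"), ("teaching", "taught"),
  ("helping", "helped"), ("giving", "gave"), ("taking", "took"),
  ("making", "made"), ("doing", "did"), ("saying", "said"),
  ("seeing", "saw"), ("looking", "looked"), ("walking", "walked"),
  ("talking", "talked"), ("sitting", "sat"), ("standing", "stood"),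
  ("buying", "bought"), ("selling", "sold"), ("building", "built"),
  ("kicking", "kicked"), ("throwing", "threw"), ("catching", "caught")]

-- the auxiliary tuple ('is', 'are', 'was', 'were')
def pvAuxes : List String := ["is", "are", "was", "were"]

-- A's while loop: consumes 2 words on a rewrite (i += 2), otherwise 1 (i += 1);
-- the [w] case is A's 'i + 1 < len(words)' guard failing.
def pvLoopA : List String → List String
  | [] => []
  | [w] => [w]
  | w :: w2 :: rest =>
    if pvAuxes.contains (PySem.Str.lower w) then
      let nw := PySem.Str.lower w2
      match pvCmap.get? nw with
      | some p => p :: pvLoopA rest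
      | none =>
        if PySem.Str.endswith nw "ing" && decide (4 < PySem.Str.len nw) then
          (PySem.Str.slice nw none (some (-3)) ++ "ed") :: pvLoopA rest
        else
          w :: pvLoopA (w2 :: rest)
    else
      w :: pvLoopA (w2 :: rest)

def rewrite_continuous (sentence : String) : String :=
  PySem.Str.join " " (pvLoopA (PySem.Str.split₀ sentence))

-- ===== PORT B =====
-- B's loop state: the pending auxiliary (None or the held word)
def pvLoopB : Option String → List String → List String
  | none, [] => []
  | some aux, [] => [aux]
  | some aux, w :: rest =>
    let low := PySem.Str.lower w
    match pvCmap.get? low with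
    | some p => p :: pvLoopB none rest
    | none =>
      if PySem.Str.endswith low "ing" && decide (4 < PySem.Str.len low) then
        (PySem.Str.slice low none (some (-3)) ++ "ed") :: pvLoopB none rest
      else
        aux :: (if pvAuxes.contains (PySem.Str.lower w) then pvLoopB (some w) rest
                else w :: pvLoopB none rest)
  | none, w :: rest =>
    if pvAuxes.contains (PySem.Str.lower w) then pvLoopB (some w) rest
    else w :: pvLoopB none rest

def rewrite_continuous_alt (sentence : String) : String :=
  PySem.Str.join " " (pvLoopB none (PySem.Str.split₀ sentence))

-- ===== PRECONDITION & SPEC =====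
def Spec_rewrite_continuous (sentence : String) (out : String) : Prop := out = rewrite_continuous_alt sentence
instance (sentence : String) (out : String) : Decidable (Spec_rewrite_continuous sentence out) := by unfold Spec_rewrite_continuous; infer_instance

-- ===== CLAIM (what is proved, stated in full; the proofs are below) =====
def Claim_equal_rewrite_continuous : Prop := ∀ (sentence : String), Dom_rewrite_continuous sentence → Spec_rewrite_continuous sentence (rewrite_continuous sentence)

-- ===== LEMMAS AND PROOFS =====

-- when the head is not an auxiliary, A's loop just emits it
theorem pvLoopA_cons_notaux (w : String) (rest : List String)
    (h : PySem.Str.lower w ∉ pvAuxes) :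
    pvLoopA (w :: rest) = w :: pvLoopA rest := by
  cases rest with
  | nil => rfl
  | cons w2 rest' => simp [pvLoopA, h]

-- the loops agree: B in state `none` tracks A; B holding an auxiliary `aux`
-- tracks A on `aux :: ws`
theorem pvLoop_eq (ws : List String) :
    pvLoopB none ws = pvLoopA ws ∧
    ∀ aux, PySem.Str.lower aux ∈ pvAuxes →
      pvLoopB (some aux) ws = pvLoopA (aux :: ws) := by
  induction ws with
  | nil => exact ⟨rfl, fun aux h => rfl⟩
  | cons w rest ih =>
    constructor
    · by_cases hw : PySem.Str.lower w ∈ pvAuxes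
      · have h2 := ih.2 w hw
        simp [pvLoopB, hw, h2]
      · have e := pvLoopA_cons_notaux w rest hw
        simp [pvLoopB, hw, ih.1, e]
    · intro aux haux
      cases hget : pvCmap.get? (PySem.Str.lower w) with
      | some p => simp [pvLoopA, pvLoopB, haux, hget, ih.1]
      | none =>
        by_cases hC : PySem.Chars.endswith (PySem.Chars.lower w.toList) ['i', 'n', 'g'] = true ∧
            4 < (PySem.Chars.lower w.toList).length
        · simp [pvLoopA, pvLoopB, haux, hget, hC, ih.1]
        · by_cases hw : PySem.Str.lower w ∈ pvAuxes
          · have h2 := ih.2 w hw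
            simp [pvLoopA, pvLoopB, haux, hget, hC, hw, h2]
          · have e := pvLoopA_cons_notaux w rest hw
            simp [pvLoopA, pvLoopB, haux, hget, hC, hw, ih.1, e]

-- ===== VERDICT (by name: the statement is the Claim_ definition above) =====
theorem rewrite_continuous_spec : Claim_equal_rewrite_continuous := by
  intro sentence _
  show rewrite_continuous sentence = rewrite_continuous_alt sentence
  unfold rewrite_continuous rewrite_continuous_alt
  rw [(pvLoop_eq (PySem.Str.split₀ sentence)).1]
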